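-- pv_equiv track=rewrite | github.com/alexakka/python-for-data-quality-engineering | Functions/refactored_collections.py | map_dicts
-- ===== SOURCE A (Python) =====
-- def map_dicts(dicts: list):
--     mapped_dict = {}
--
--     # Iterate through each dictionary
--     for i, d in enumerate(dicts):
--         for key, value in d.items():
--             # If key already exists, compare and keep the one with higher value
--             if key in mapped_dict:
--                 if value > mapped_dict[key][0]:
--                     mapped_dict[key] = (value, i)
--             else:
--                 # New key, add to mapped_dict
--                 mapped_dict[key] = (value, i)
--
--     return mapped_dict
-- ===== SOURCE B (Python) =====
-- def map_dicts(dicts: list):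
--     # Pass 1: group every (value, source-index) pair by key, in encounter order.
--     groups = {}
--     for i, d in enumerate(dicts):
--         for key, value in d.items():
--             groups.setdefault(key, []).append((value, i))
--     # Pass 2: per key take the first maximal pair by value (max keeps the
--     # earliest on ties, matching the running strict-> update).
--     return {key: max(pairs, key=lambda t: t[0]) for key, pairs in groups.items()}
-- ===== Notes on version B (the rewrite author's own statement) =====
-- stated objective: alternative
-- what changed: Replaces the inline running-max update inside the scan with a group-then-reduce: one pass builds key -> list of (value, index) pairs, a second pass takes the first value-maximal pair per key with max(key=t[0]).
import Mathlib
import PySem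

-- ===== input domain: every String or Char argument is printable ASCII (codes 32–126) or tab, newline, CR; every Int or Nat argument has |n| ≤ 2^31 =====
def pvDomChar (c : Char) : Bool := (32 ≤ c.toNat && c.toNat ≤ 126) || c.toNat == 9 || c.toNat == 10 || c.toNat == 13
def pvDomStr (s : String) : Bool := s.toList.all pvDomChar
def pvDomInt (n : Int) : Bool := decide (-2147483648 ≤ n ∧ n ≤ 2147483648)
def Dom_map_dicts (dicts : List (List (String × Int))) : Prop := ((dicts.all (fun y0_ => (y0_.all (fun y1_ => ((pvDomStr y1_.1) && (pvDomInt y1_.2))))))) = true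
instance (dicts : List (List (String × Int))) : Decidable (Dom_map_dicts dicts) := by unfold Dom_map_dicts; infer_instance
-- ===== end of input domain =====

-- B replaces A's inline running-max update with a group-then-reduce over a built table (alternative decomposition, same cost).
-- Each inner association list stands for a Python dict, so both ports read it through PySem.Dict.ofList (last value wins, first position kept), exactly as Python's dict constructor does.

-- ===== PORT A =====
-- A: single scan keeping, per key, the running (value, index) pair, replacing only on a strictly larger value.
def map_dicts (dicts : List (List (String × Int))) : List (String × Int × Int) :=
  ((PySem.List.enumerate dicts).foldl
    (fun m p =>
      (PySem.Dict.ofList p.2).items.foldl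
        (fun m kv =>
          if m.contains kv.1 then
            -- getD's default is never read: the contains-guard holds here
            (if kv.2 > (m.getD kv.1 (0, 0)).1 then m.insert kv.1 (kv.2, p.1) else m)
          else m.insert kv.1 (kv.2, p.1)) m)
    PySem.Dict.empty).items

-- ===== PORT B =====
-- B: pass 1 groups (value, index) pairs by key ('groups.setdefault(key, []).append(pair)' IS Dict.modify with default []),
--    pass 2 maps each key to the first value-maximal pair (max with key=t[0]; the group is never empty, so getD's default is never read).
def map_dicts_alt (dicts : List (List (String × Int))) : List (String × Int × Int) :=
  let groups :=
    (PySem.List.enumerate dicts).foldl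
      (fun g p =>
        (PySem.Dict.ofList p.2).items.foldl
          (fun g kv => g.modify kv.1 [] (fun ps => ps ++ [(kv.2, p.1)])) g)
      PySem.Dict.empty
  groups.items.map (fun kps => (kps.1, (PySem.List.max? kps.2 (fun t => t.1)).getD (0, 0)))

-- ===== PRECONDITION & SPEC =====
def Spec_map_dicts (dicts : List (List (String × Int))) (out : List (String × Int × Int)) : Prop := out = map_dicts_alt dicts
instance (dicts : List (List (String × Int))) (out : List (String × Int × Int)) : Decidable (Spec_map_dicts dicts out) := by unfold Spec_map_dicts; infer_instance

-- ===== CLAIM (what is proved, stated in full; the proofs are below) =====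
def Claim_equal_map_dicts : Prop := ∀ (dicts : List (List (String × Int))), Dom_map_dicts dicts → Spec_map_dicts dicts (map_dicts dicts)

-- ===== LEMMAS AND PROOFS =====

-- the common stream of (key, value, source-index) triples both nested loops consume
def pvFlat (dicts : List (List (String × Int))) : List (String × Int × Int) :=
  (PySem.List.enumerate dicts).flatMap
    (fun p => (PySem.Dict.ofList p.2).items.map (fun kv => (kv.1, kv.2, p.1)))

-- A's per-triple step, and B's
def pvStepA (m : PySem.Dict String (Int × Int)) (q : String × Int × Int) : PySem.Dict String (Int × Int) :=
  if m.contains q.1 then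
    (if q.2.1 > (m.getD q.1 (0, 0)).1 then m.insert q.1 q.2 else m)
  else m.insert q.1 q.2

def pvStepB (g : PySem.Dict String (List (Int × Int))) (q : String × Int × Int) : PySem.Dict String (List (Int × Int)) :=
  g.modify q.1 [] (fun ps => ps ++ [q.2])

-- a nested loop over the enumerated dicts is the flat loop over the triple stream
theorem pvNestedFlat {γ : Type} (xs : List (Int × List (String × Int))) (F : γ → String × Int × Int → γ) (init : γ) :
    xs.foldl (fun acc p => (PySem.Dict.ofList p.2).items.foldl (fun acc kv => F acc (kv.1, kv.2, p.1)) acc) init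
      = (xs.flatMap (fun p => (PySem.Dict.ofList p.2).items.map (fun kv => (kv.1, kv.2, p.1)))).foldl F init := by
  induction xs generalizing init with
  | nil => rfl
  | cons p t ih => simp [List.flatMap_cons, List.foldl_append, List.foldl_map, ih]

theorem pvStepA_get? (m : PySem.Dict String (Int × Int)) (q : String × Int × Int) (k : String) :
    (pvStepA m q).get? k =
      if q.1 = k then
        (match m.get? k with
          | none => some q.2
          | some c => if c.1 < q.2.1 then some q.2 else some c)
      else m.get? k := by
  unfold pvStepA
  cases hc : m.contains q.1 with
  | false =>
    have hn : m.get? q.1 = none := (PySem.Dict.get?_eq_none_iff_contains m q.1).mpr hc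
    by_cases hq : q.1 = k
    · subst hq; simp [PySem.Dict.get?_insert_self, hn]
    · simp [hq, PySem.Dict.get?_insert_of_ne m q.2 (Ne.symm hq)]
  | true =>
    have hs : (m.get? q.1).isSome := by rw [← PySem.Dict.contains_eq_isSome_get?]; exact hc
    obtain ⟨c, hcv⟩ := Option.isSome_iff_exists.mp hs
    have hd : m.getD q.1 (0, 0) = c := by rw [PySem.Dict.getD_eq_get?_getD, hcv]; rfl
    by_cases hq : q.1 = k
    · subst hq
      rw [hd, hcv]
      by_cases hlt : c.1 < q.2.1
      · simp [hlt, PySem.Dict.get?_insert_self]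
      · simp [hlt, hcv]
    · rw [hd]
      by_cases hlt : c.1 < q.2.1
      · simp [hlt, hq, PySem.Dict.get?_insert_of_ne m q.2 (Ne.symm hq)]
      · simp [hlt, hq]

theorem pvFoldA_get? (l : List (String × Int × Int)) (m : PySem.Dict String (Int × Int)) (k : String) :
    (l.foldl pvStepA m).get? k =
      ((l.filter (fun q => q.1 == k)).map (fun q => q.2)).foldl
        (fun acc x =>
          match acc with
          | none => some x
          | some c => if c.1 < x.1 then some x else some c)
        (m.get? k) := by
  induction l generalizing m with
  | nil => rfl
  | cons q t ih =>
    by_cases hq : q.1 = k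
    · simp only [List.foldl_cons, ih, List.filter_cons, beq_self_eq_true, if_true,
        List.map_cons, pvStepA_get? m q k, hq]
    · simp only [List.foldl_cons, ih, List.filter_cons,
        pvStepA_get? m q k, hq, beq_iff_eq, if_false]

theorem pvStepA_keys (m : PySem.Dict String (Int × Int)) (q : String × Int × Int) :
    (pvStepA m q).keys = PySem.Set.add m.keys q.1 := by
  unfold pvStepA
  cases hc : m.contains q.1 with
  | false =>
    have hm : ¬ q.1 ∈ m.keys := by
      intro h
      have ht := (PySem.Dict.contains_iff_mem_keys m q.1).mpr h
      simp [hc] at ht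
    simp [PySem.Dict.keys_insert_of_not_contains m q.2 hc, PySem.Set.add, PySem.Set.contains, hm]
  | true =>
    have hm : q.1 ∈ m.keys := (PySem.Dict.contains_iff_mem_keys m q.1).mp hc
    by_cases hlt : q.2.1 > (m.getD q.1 (0, 0)).1
    · simp [hlt, PySem.Dict.keys_insert_of_contains m q.2 hc, PySem.Set.add, PySem.Set.contains, hm]
    · simp [hlt, PySem.Set.add, PySem.Set.contains, hm]

theorem pvFoldA_keys (l : List (String × Int × Int)) (m : PySem.Dict String (Int × Int)) :
    (l.foldl pvStepA m).keys = PySem.Set.update m.keys (l.map (fun q => q.1)) := by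
  induction l generalizing m with
  | nil => rfl
  | cons q t ih =>
    simp only [List.foldl_cons, List.map_cons, PySem.Set.update_cons, ih, pvStepA_keys]

-- ===== VERDICT (by name: the statement is the Claim_ definition above) =====
theorem map_dicts_spec : Claim_equal_map_dicts := by
  intro dicts _
  unfold Spec_map_dicts map_dicts map_dicts_alt
  have hA : ((PySem.List.enumerate dicts).foldl
      (fun m p =>
        (PySem.Dict.ofList p.2).items.foldl
          (fun m kv =>
            if m.contains kv.1 then
              (if kv.2 > (m.getD kv.1 (0, 0)).1 then m.insert kv.1 (kv.2, p.1) else m)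
            else m.insert kv.1 (kv.2, p.1)) m)
      PySem.Dict.empty) = (pvFlat dicts).foldl pvStepA PySem.Dict.empty :=
    pvNestedFlat (PySem.List.enumerate dicts) pvStepA PySem.Dict.empty
  have hB : ((PySem.List.enumerate dicts).foldl
      (fun g p =>
        (PySem.Dict.ofList p.2).items.foldl
          (fun g kv => g.modify kv.1 [] (fun ps => ps ++ [(kv.2, p.1)])) g)
      PySem.Dict.empty) = (pvFlat dicts).foldl pvStepB PySem.Dict.empty :=
    pvNestedFlat (PySem.List.enumerate dicts) pvStepB PySem.Dict.empty
  rw [hA, hB]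
  set l := pvFlat dicts with hl
  -- both dicts list their keys in first-encounter order of the triple stream
  have hkA : ((l.foldl pvStepA PySem.Dict.empty).keys) = PySem.Set.ofList (l.map (fun q => q.1)) := by
    rw [pvFoldA_keys]
    rfl
  have hkB : ((l.foldl pvStepB PySem.Dict.empty).keys) = PySem.Set.ofList (l.map (fun q => q.1)) := by
    have := PySem.Dict.keys_foldl_modify_key (l := l) (key := fun q => q.1)
      (d0 := ([] : List (Int × Int))) (f := fun (_ : PySem.Dict String (List (Int × Int))) q ps => ps ++ [q.2])
      (d := PySem.Dict.empty)
    simpa [PySem.Set.update_empty, pvStepB] using this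
  have hndA : ((l.foldl pvStepA PySem.Dict.empty).keys).Nodup := by
    rw [hkA]; exact PySem.Set.nodup_ofList _
  have hndB : ((l.foldl pvStepB PySem.Dict.empty).keys).Nodup := by
    rw [hkB]; exact PySem.Set.nodup_ofList _
  show (List.foldl pvStepA PySem.Dict.empty l).items =
    List.map (fun kps => (kps.1, (PySem.List.max? kps.2 fun t => t.1).getD (0, 0)))
      (List.foldl pvStepB PySem.Dict.empty l).items
  rw [PySem.Dict.items_eq_map_keys _ hndA ((0 : Int), (0 : Int)),
      PySem.Dict.items_eq_map_keys _ hndB ([] : List (Int × Int)), List.map_map, hkA, hkB]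
  apply List.map_congr_left
  intro k _
  simp only [Function.comp]
  congr 1
  -- per key: A's running max equals max? over B's collected group
  have hgB : (l.foldl pvStepB PySem.Dict.empty).getD k [] =
      (l.filter (fun q => q.1 == k)).map (fun q => q.2) := by
    have := PySem.Dict.getD_foldl_modify_append (l := l) (d := PySem.Dict.empty) (c := k)
    simpa [pvStepB] using this
  rw [hgB, PySem.Dict.getD_eq_get?_getD, pvFoldA_get?, PySem.Dict.get?_empty]
  simp only [PySem.List.max?]
  congr 2
  funext acc x
  cases acc <;> rfl
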